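-- pv_equiv track=rewrite | github.com/mparikh20/short-scripts | Words_from_article/20191110_1.py | wordcleaner
-- ===== SOURCE A (Python) =====
-- def wordcleaner(wordlist):
--     cleaned_list = []
--     for word in wordlist:
--         word = word.lower()
--         word = word.strip('"').strip(".").strip(",").strip("(").strip(")")
--         if word.count("-") > 0:
--             dehyphened = word.split("-") # eg. ["age","related"]
--             cleaned_list = cleaned_list + dehyphened
--         else:
--             cleaned_list.append(word)
--     return(cleaned_list)
-- ===== SOURCE B (Python) =====
-- def _lstrip1(w, c):
--     # drop leading copies of the single character c
--     i = 0
--     while i < len(w) and w[i] == c: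
--         i += 1
--     return w[i:]
--
--
-- def wordcleaner(wordlist):
--     out = []
--     for word in wordlist:
--         w = word.lower()
--         # trim each character in order from both ends via lstrip + reverse
--         for c in '".,()':
--             w = _lstrip1(w, c)[::-1]
--             w = _lstrip1(w, c)[::-1]
--         # character-level scanner: emit a token at every hyphen
--         cur = ""
--         for ch in w:
--             if ch == '-':
--                 out.append(cur)
--                 cur = ""
--             else:
--                 cur += ch
--         out.append(cur)
--     return out
-- ===== Notes on version B (the rewrite author's own statement) =====
-- stated objective: alternative
-- what changed: Replaces the library strip/count/split machinery by hand mechanisms: each strip character is trimmed with a one-sided pointer lstrip applied twice around a reversal, and hyphen splitting is a character-level scanner that flushes a growing token at every '-' , so the count test and the branch disappear.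
import Mathlib
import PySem

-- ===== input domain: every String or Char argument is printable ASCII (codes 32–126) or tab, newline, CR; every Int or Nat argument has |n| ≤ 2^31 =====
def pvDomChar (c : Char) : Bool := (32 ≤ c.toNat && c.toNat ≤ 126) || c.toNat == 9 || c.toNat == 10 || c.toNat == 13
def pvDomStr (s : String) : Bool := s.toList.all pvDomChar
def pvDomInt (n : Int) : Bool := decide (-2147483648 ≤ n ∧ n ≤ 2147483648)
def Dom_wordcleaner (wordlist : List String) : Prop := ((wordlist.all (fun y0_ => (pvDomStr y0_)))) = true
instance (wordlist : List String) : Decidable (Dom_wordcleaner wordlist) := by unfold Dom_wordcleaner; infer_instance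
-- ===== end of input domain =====

-- B drops the library strip/count/split machinery: each strip character is trimmed by a
-- one-sided pointer lstrip applied twice around a reversal, and hyphens are handled by a
-- character-level scanner that flushes the growing token at every '-'; objective: alternative.

-- ===== PORT A =====
def wordcleaner (wordlist : List String) : List String :=
  wordlist.foldl (fun cleaned_list word =>
    let word := PySem.Str.lower word
    let word := PySem.Str.stripChars (PySem.Str.stripChars (PySem.Str.stripChars
      (PySem.Str.stripChars (PySem.Str.stripChars word "\"") ".") ",") "(") ")"
    if PySem.Str.count word "-" > 0 then
      cleaned_list ++ (PySem.Str.split? word "-").getD []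
    else
      cleaned_list ++ [word]) []

-- ===== PORT B =====
-- _lstrip1(w, c): drop leading copies of the single character c (the pointer while-loop,
-- ported as the obvious structural recursion)
def pvLstrip1 (c : Char) : List Char → List Char
  | [] => []
  | x :: xs => if x == c then pvLstrip1 c xs else x :: xs

-- the inner `for ch in w` scanner: cur grows by appending, a '-' flushes it to out
def pvScan (out : List String) (cur : List Char) : List Char → List String
  | [] => out ++ [String.ofList cur]
  | ch :: rest =>
      if ch == '-' then pvScan (out ++ [String.ofList cur]) [] rest
      else pvScan out (cur ++ [ch]) rest

def wordcleaner_alt (wordlist : List String) : List String :=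
  wordlist.foldl (fun out word =>
    let w := (PySem.Str.lower word).toList
    let w := ['"', '.', ',', '(', ')'].foldl
      (fun w c => (pvLstrip1 c ((pvLstrip1 c w).reverse)).reverse) w
    pvScan out [] w) []

-- ===== PRECONDITION & SPEC =====
def Spec_wordcleaner (wordlist : List String) (out : List String) : Prop := out = wordcleaner_alt wordlist
instance (wordlist : List String) (out : List String) : Decidable (Spec_wordcleaner wordlist out) := by unfold Spec_wordcleaner; infer_instance

-- ===== CLAIM (what is proved, stated in full; the proofs are below) =====
def Claim_equal_wordcleaner : Prop := ∀ (wordlist : List String), Dom_wordcleaner wordlist → Spec_wordcleaner wordlist (wordcleaner wordlist)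

-- ===== LEMMAS AND PROOFS =====

-- pvLstrip1 is dropWhile of the singleton-membership predicate stripChars uses
lemma pvLstrip1_eq (c : Char) (l : List Char) :
    pvLstrip1 c l = l.dropWhile (fun x => [c].contains x) := by
  induction l with
  | nil => rfl
  | cons x xs ih =>
    by_cases hx : x = c
    · subst hx; simp [pvLstrip1, List.dropWhile, ih]
    · simp [pvLstrip1, hx, List.dropWhile]

-- B's double lstrip-around-reverse is exactly stripChars with the one-character set
lemma clean_step (c : Char) (w : List Char) :
    (pvLstrip1 c ((pvLstrip1 c w).reverse)).reverse = PySem.Chars.stripChars w [c] := by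
  simp [pvLstrip1_eq, PySem.Chars.stripChars]

-- splitOn's worker: the extra accumulator factors out in front
lemma splitOn_go_acc (sep : List Char) :
    ∀ (fuel : ℕ) (l cur : List Char) (acc : List (List Char)),
      PySem.Chars.splitOn.go sep fuel l cur acc
        = acc.reverse ++ PySem.Chars.splitOn.go sep fuel l cur [] := by
  intro fuel
  induction fuel with
  | zero => intro l cur acc; simp [PySem.Chars.splitOn.go]
  | succ n ih =>
    intro l cur acc
    cases l with
    | nil => simp [PySem.Chars.splitOn.go]
    | cons x rest =>
      rw [PySem.Chars.splitOn.go, PySem.Chars.splitOn.go]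
      by_cases hpre : sep.isPrefixOf (x :: rest) = true
      · simp only [hpre, if_true]
        rw [ih _ _ (cur.reverse :: acc), ih _ _ (cur.reverse :: [])]
        simp
      · simp only [hpre]
        exact ih _ _ acc

-- the scanner computes splitOn on '-', token by token
lemma pvScan_eq_go :
    ∀ (cs : List Char) (fuel : ℕ), cs.length ≤ fuel →
      ∀ (cur : List Char) (out : List String),
        pvScan out cur cs
          = out ++ (PySem.Chars.splitOn.go ['-'] fuel cs cur.reverse []).map
              (fun l => String.ofList l) := by
  intro cs
  induction cs with
  | nil =>
    intro fuel _ cur out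
    cases fuel with
    | zero => simp [pvScan, PySem.Chars.splitOn.go]
    | succ n => simp [pvScan, PySem.Chars.splitOn.go]
  | cons ch rest ih =>
    intro fuel hf cur out
    cases fuel with
    | zero => exact absurd hf (by simp)
    | succ n =>
      have hn : rest.length ≤ n := by simpa using Nat.le_of_succ_le_succ hf
      by_cases hch : ch = '-'
      · subst hch
        have hpre : List.isPrefixOf ['-'] ('-' :: rest) = true := by simp
        rw [PySem.Chars.splitOn.go]
        simp only [hpre, if_true]
        rw [show pvScan out cur ('-' :: rest)
            = pvScan (out ++ [String.ofList cur]) [] rest by simp [pvScan]]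
        rw [ih n hn [] (out ++ [String.ofList cur]),
          splitOn_go_acc ['-'] n (List.drop ['-'].length ('-' :: rest)) [] (cur.reverse.reverse :: [])]
        simp
      · have hpre : List.isPrefixOf ['-'] (ch :: rest) = false := by
          simp [List.isPrefixOf_cons₂, Ne.symm hch]
        rw [PySem.Chars.splitOn.go]
        simp only [hpre, Bool.false_eq_true, if_false]
        rw [show pvScan out cur (ch :: rest)
            = pvScan out (cur ++ [ch]) rest by simp [pvScan, hch]]
        rw [ih n hn (cur ++ [ch]) out]
        simp

-- count's worker counts occurrences of a single character
lemma count_go_single (c : Char) :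
    ∀ (fuel : ℕ) (l : List Char) (acc : ℕ), l.length ≤ fuel →
      PySem.Chars.count.go [c] fuel l acc = acc + l.count c := by
  intro fuel
  induction fuel with
  | zero =>
    intro l acc h
    cases l with
    | nil => simp [PySem.Chars.count.go]
    | cons x rest => exact absurd h (by simp)
  | succ n ih =>
    intro l acc h
    cases l with
    | nil => simp [PySem.Chars.count.go]
    | cons x rest =>
      rw [PySem.Chars.count.go]
      by_cases hx : x = c
      · subst hx
        have hpre : List.isPrefixOf [x] (x :: rest) = true := by simp
        simp only [hpre, if_true]
        rw [show List.drop [x].length (x :: rest) = rest from rfl,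
          ih rest (acc + 1) (by simpa using Nat.le_of_succ_le_succ h)]
        simp
        omega
      · have hpre : List.isPrefixOf [c] (x :: rest) = false := by
          simp [List.isPrefixOf_cons₂, Ne.symm hx]
        simp only [hpre, Bool.false_eq_true, if_false]
        rw [ih rest acc (by simpa using Nat.le_of_succ_le_succ h)]
        simp [hx]

lemma chars_count_single (cs : List Char) (c : Char) :
    PySem.Chars.count cs [c] = cs.count c := by
  rw [PySem.Chars.count]
  simp only [List.isEmpty_cons, if_neg, Bool.false_eq_true, not_false_eq_true]
  simpa using count_go_single c cs.length cs 0 le_rfl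

-- splitOn's worker never splits when the (single-character) separator does not occur
lemma splitOn_go_not_mem (c : Char) :
    ∀ (fuel : ℕ) (l cur : List Char) (acc : List (List Char)), c ∉ l →
      PySem.Chars.splitOn.go [c] fuel l cur acc = ((cur.reverse ++ l) :: acc).reverse := by
  intro fuel
  induction fuel with
  | zero => intro l cur acc _; simp [PySem.Chars.splitOn.go]
  | succ n ih =>
    intro l cur acc h
    cases l with
    | nil => simp [PySem.Chars.splitOn.go]
    | cons x rest =>
      have hx : x ≠ c := fun hxc => h (hxc ▸ List.mem_cons_self)
      have hr : c ∉ rest := fun hm => h (List.mem_cons_of_mem _ hm)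
      have hpre : List.isPrefixOf [c] (x :: rest) = false := by
        simp [List.isPrefixOf_cons₂, Ne.symm hx]
      rw [PySem.Chars.splitOn.go]
      simp only [hpre, Bool.false_eq_true, if_false]
      rw [ih rest (x :: cur) acc hr]
      simp

-- s.split("-") = [s] when s contains no hyphen
lemma split_of_count_zero (w : String) (h : PySem.Str.count w "-" = 0) :
    PySem.Str.split? w "-" = some [w] := by
  have hm : '-' ∉ w.toList := by
    rw [PySem.Str.count_eq, show ("-".toList) = ['-'] from rfl, chars_count_single] at h
    exact List.count_eq_zero.mp h
  have hsplit : PySem.Chars.splitOn w.toList ['-'] = [w.toList] := by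
    rw [PySem.Chars.splitOn, splitOn_go_not_mem '-' _ _ _ _ hm]; simp
  have hmap := PySem.Str.split?_map w "-"
  have hc : PySem.Chars.split? w.toList "-".toList = some [w.toList] := by
    rw [show ("-".toList) = ['-'] from rfl, PySem.Chars.split?]; simp [hsplit]
  rw [hc] at hmap
  cases hs : PySem.Str.split? w "-" with
  | none => rw [hs] at hmap; simp at hmap
  | some parts =>
    rw [hs] at hmap
    simp only [Option.map_some, Option.some.injEq] at hmap
    cases parts with
    | nil => simp at hmap
    | cons p ps =>
      simp only [List.map_cons, List.cons.injEq] at hmap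
      obtain ⟨hp, hps⟩ := hmap
      have hps' : ps = [] := by simpa using congrArg List.length hps
      have hp' : p = w := String.ext hp
      simp [hp', hps']

-- the cleaning chain of A, named for the proofs
def pvClean (word : String) : String :=
  PySem.Str.stripChars (PySem.Str.stripChars (PySem.Str.stripChars
    (PySem.Str.stripChars (PySem.Str.stripChars (PySem.Str.lower word) "\"") ".") ",") "(") ")"

-- s.split("-") is splitOn on the char side, re-packed with String.ofList
lemma split_getD_eq (s : String) :
    (PySem.Str.split? s "-").getD []
      = (PySem.Chars.splitOn s.toList ['-']).map (fun l => String.ofList l) := by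
  have hmap := PySem.Str.split?_map s "-"
  have hc : PySem.Chars.split? s.toList "-".toList
      = some (PySem.Chars.splitOn s.toList ['-']) := by
    rw [show ("-".toList) = ['-'] from rfl, PySem.Chars.split?]; simp
  rw [hc] at hmap
  cases hs : PySem.Str.split? s "-" with
  | none => rw [hs] at hmap; simp at hmap
  | some parts =>
    rw [hs] at hmap
    simp only [Option.map_some, Option.some.injEq] at hmap
    rw [← hmap]
    simp only [Option.getD_some, List.map_map]
    refine (List.map_id parts).symm.trans (List.map_congr_left ?_)
    intro p _
    exact String.ofList_toList.symm

-- A unrolled: the accumulator loop is the flatMap of the per-word split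
lemma wordcleaner_aux (ws : List String) :
    ∀ acc : List String,
      ws.foldl (fun cleaned_list word =>
        let word := PySem.Str.lower word
        let word := PySem.Str.stripChars (PySem.Str.stripChars (PySem.Str.stripChars
          (PySem.Str.stripChars (PySem.Str.stripChars word "\"") ".") ",") "(") ")"
        if PySem.Str.count word "-" > 0 then
          cleaned_list ++ (PySem.Str.split? word "-").getD []
        else
          cleaned_list ++ [word]) acc
      = acc ++ ws.flatMap (fun word => (PySem.Str.split? (pvClean word) "-").getD []) := by
  induction ws with
  | nil => intro acc; simp
  | cons w rest ih =>
    intro acc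
    rw [List.foldl_cons, List.flatMap_cons, ih]
    show (if PySem.Str.count (pvClean w) "-" > 0 then
        acc ++ (PySem.Str.split? (pvClean w) "-").getD []
      else acc ++ [pvClean w]) ++ _ = _
    by_cases hc : PySem.Str.count (pvClean w) "-" > 0
    · rw [if_pos hc]; simp
    · rw [if_neg hc]
      have h0 : PySem.Str.count (pvClean w) "-" = 0 := Nat.eq_zero_of_not_pos hc
      rw [split_of_count_zero _ h0]
      simp

-- B's per-word trimming foldl equals A's cleaning chain, on the char side
lemma cleanAlt_eq (word : String) :
    ['"', '.', ',', '(', ')'].foldl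
      (fun w c => (pvLstrip1 c ((pvLstrip1 c w).reverse)).reverse)
      (PySem.Str.lower word).toList
    = (pvClean word).toList := by
  simp only [List.foldl_cons, List.foldl_nil, clean_step]
  simp [pvClean, PySem.Str.toList_stripChars,
    show ("\"".toList) = ['"'] from rfl, show (".".toList) = ['.'] from rfl,
    show (",".toList) = [','] from rfl, show ("(".toList) = ['('] from rfl,
    show (")".toList) = [')'] from rfl]

-- the whole per-word body of B emits exactly A's per-word split
lemma scan_word (acc : List String) (word : String) :
    pvScan acc []
      (['"', '.', ',', '(', ')'].foldl
        (fun w c => (pvLstrip1 c ((pvLstrip1 c w).reverse)).reverse)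
        (PySem.Str.lower word).toList)
    = acc ++ (PySem.Str.split? (pvClean word) "-").getD [] := by
  rw [cleanAlt_eq,
    pvScan_eq_go (pvClean word).toList ((pvClean word).toList.length + 1) (by omega) [] acc,
    split_getD_eq]
  rfl

-- B unrolled: its out-accumulator loop is the same flatMap
lemma wordcleaner_alt_aux (ws : List String) :
    ∀ acc : List String,
      ws.foldl (fun out word =>
        let w := (PySem.Str.lower word).toList
        let w := ['"', '.', ',', '(', ')'].foldl
          (fun w c => (pvLstrip1 c ((pvLstrip1 c w).reverse)).reverse) w
        pvScan out [] w) acc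
      = acc ++ ws.flatMap (fun word => (PySem.Str.split? (pvClean word) "-").getD []) := by
  induction ws with
  | nil => intro acc; simp
  | cons w rest ih =>
    intro acc
    rw [List.foldl_cons, List.flatMap_cons, ih]
    simp only [scan_word]
    simp

-- ===== VERDICT (by name: the statement is the Claim_ definition above) =====
theorem wordcleaner_spec : Claim_equal_wordcleaner := by
  intro wordlist _
  unfold Spec_wordcleaner wordcleaner wordcleaner_alt
  rw [wordcleaner_aux wordlist [], wordcleaner_alt_aux wordlist []]
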